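-- pv_equiv track=rewrite | github.com/blakedaniel/Coding_Projects | advent_of_code/_day_7/day7_part1_completed.py | pathifyDirect
-- ===== SOURCE A (Python) =====
-- def concat_lst(lst):
--     string = ''
--     for n in lst:
--         # n = n + '_'
--         string += n
--     return string
--
-- def pathifyDirect(lsts):
--     path = []
--     directories = []
--     for line in lsts:
--         if len(line) == 3:  # either setting a new directory or moving up a directory
--             if line[2] == '..':  # moving up a directory
--                 path.pop()
--                 directory_path = concat_lst(path)
--             else:  # setting a new directory
--                 path.append(line[2])
--                 directory_path = concat_lst(path)
--                 line[2] = directory_path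
--                 directories.append(directory_path)
--         else:  # contents of a directory
--             if line[0].isnumeric():  # file_size, file_name
--                 pass
--             elif line[0] == 'dir':  # dir, directory_name
--                 line[1] = f'{directory_path}{line[1]}'
--     return (lsts, directories)
-- ===== SOURCE B (Python) =====
-- # B: instead of rebuilding the whole path with concat_lst on every cd/'..',
-- # keep a stack of cumulative path strings: push = one concat, pop = read the new top.
-- # Note: A mutates lsts' inner lists in place and returns the same object;
-- # B builds fresh output lists — the equivalence claimed is about return values.
-- def pathifyDirect(lsts):
--     stack = []          # stack[i] = concatenation of the first i+1 path parts
--     cur = ''            # current directory path (top of stack, '' when empty)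
--     out = []
--     directories = []
--     for line in lsts:
--         if len(line) == 3:
--             if line[2] == '..':
--                 stack.pop()
--                 cur = stack[-1] if stack else ''
--                 out.append(line)
--             else:
--                 cur = (stack[-1] if stack else '') + line[2]
--                 stack.append(cur)
--                 directories.append(cur)
--                 out.append(line[:2] + [cur])
--         elif line[0] == 'dir':
--             out.append([line[0], cur + line[1]] + line[2:])
--         else:
--             out.append(line)
--     return (out, directories)
-- ===== Notes on version B (the rewrite author's own statement) =====
-- stated objective: alternative
-- what changed: Instead of rebuilding the whole current path with concat_lst after every cd/'..' line, B maintains a stack of cumulative path strings (push = one concatenation, pop = read the new top), and builds fresh output lists instead of mutating lsts in place (return values are identical).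
import Mathlib
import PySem

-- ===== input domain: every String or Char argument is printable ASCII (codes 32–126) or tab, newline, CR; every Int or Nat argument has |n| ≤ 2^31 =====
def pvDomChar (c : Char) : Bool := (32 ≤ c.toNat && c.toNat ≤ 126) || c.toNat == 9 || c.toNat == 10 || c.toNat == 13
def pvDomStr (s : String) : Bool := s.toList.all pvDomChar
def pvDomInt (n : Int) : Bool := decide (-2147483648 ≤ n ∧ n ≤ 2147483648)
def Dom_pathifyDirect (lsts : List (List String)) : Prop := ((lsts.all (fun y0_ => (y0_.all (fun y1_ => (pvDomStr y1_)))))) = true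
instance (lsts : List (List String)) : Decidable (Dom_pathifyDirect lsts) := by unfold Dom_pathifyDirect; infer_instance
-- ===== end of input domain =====

-- B replaces A's per-line whole-path re-concatenation with a stack of cumulative
-- path strings (push = one concat, pop = read the new top); A mutates lsts in
-- place and returns it, B builds fresh lists: the equivalence is about return values only.

-- ===== PORT A =====

-- A's helper concat_lst: left fold of string concatenation over the list
def concatLst (lst : List String) : String := lst.foldl (fun s n => s ++ n) ""

-- state: (path, directories, directory_path?, accumulated mutated lines);
-- directory_path is Option since Python leaves it unbound before any 3-line
def stepA (st : List String × List String × Option String × List (List String))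
    (line : List String) : List String × List String × Option String × List (List String) :=
  let (path, dirs, dp, out) := st
  if line.length = 3 then
    if PySem.List.pyGet? line 2 = some ".." then
      -- path.pop(): raises IndexError on empty path in Python (excluded by Pre_)
      let path' := path.dropLast
      (path', dirs, some (concatLst path'), out ++ [line])
    else
      let name := (PySem.List.pyGet? line 2).getD ""
      let path' := path ++ [name]
      let dp' := concatLst path'
      (path', dirs ++ [dp'], some dp', out ++ [line.set 2 dp'])
  else
    match line with
    | [] => (path, dirs, dp, out ++ [line])  -- line[0] raises IndexError (excluded by Pre_)
    | h :: t =>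
      if PySem.Str.strIsdigit h then (path, dirs, dp, out ++ [line])  -- isnumeric = isdigit on the ASCII domain
      else if h = "dir" then
        match t with
        | x :: rest => (path, dirs, dp, out ++ [h :: ((dp.getD "") ++ x) :: rest])
          -- dp = none is Python's UnboundLocalError, t = [] its IndexError (both excluded by Pre_)
        | [] => (path, dirs, dp, out ++ [line])
      else (path, dirs, dp, out ++ [line])

def pathifyDirect (lsts : List (List String)) : List (List String) × List String :=
  let st := lsts.foldl stepA ([], [], none, [])
  (st.2.2.2, st.2.1)

-- ===== PORT B =====

-- state: (stack of cumulative paths, cur, output lines, directories)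
def stepB (st : List String × String × List (List String) × List String)
    (line : List String) : List String × String × List (List String) × List String :=
  let (stack, cur, out, dirs) := st
  if line.length = 3 then
    if PySem.List.pyGet? line 2 = some ".." then
      -- stack.pop(): raises on empty stack in Python (excluded by Pre_)
      let stack' := stack.dropLast
      (stack', stack'.getLast?.getD "", out ++ [line], dirs)
    else
      let cur' := (stack.getLast?.getD "") ++ (PySem.List.pyGet? line 2).getD ""
      (stack ++ [cur'], cur', out ++ [line.take 2 ++ [cur']], dirs ++ [cur'])
  else
    match line with
    | [] => (stack, cur, out ++ [line], dirs)  -- line[0] raises in Python (excluded by Pre_)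
    | h :: t =>
      if h = "dir" then
        match t with
        | x :: rest => (stack, cur, out ++ [h :: (cur ++ x) :: rest], dirs)
        | [] => (stack, cur, out ++ [line], dirs)  -- line[1] raises (excluded by Pre_)
      else (stack, cur, out ++ [line], dirs)

def pathifyDirect_alt (lsts : List (List String)) : List (List String) × List String :=
  let st := lsts.foldl stepB ([], "", [], [])
  (st.2.2.1, st.2.2.2)

-- ===== PRECONDITION & SPEC =====

def isPopLine (l : List String) : Bool := l.length == 3 && PySem.List.pyGet? l 2 == some ".."
def isPushLine (l : List String) : Bool := l.length == 3 && !(PySem.List.pyGet? l 2 == some "..")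

-- no pop on an empty path (IndexError), no empty content line (IndexError),
-- every 'dir' content line has a name (IndexError otherwise)
def BaseOK_pathifyDirect (lsts : List (List String)) : Prop :=
  ∀ i < lsts.length,
    (isPopLine (lsts[i]!) = true →
      (lsts.take i).countP isPopLine < (lsts.take i).countP isPushLine)
    ∧ ((lsts[i]!).length ≠ 3 →
        lsts[i]! ≠ [] ∧ ((lsts[i]!).headD "" = "dir" → 2 ≤ (lsts[i]!).length))

-- every 'dir' content line comes after some 3-element line, so that
-- directory_path is bound when A reads it (UnboundLocalError otherwise)
def DirOK_pathifyDirect (lsts : List (List String)) : Prop :=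
  ∀ i < lsts.length,
    ((lsts[i]!).length ≠ 3 ∧ (lsts[i]!).headD "" = "dir") →
      ∃ j < i, (lsts[j]!).length = 3

-- Pre_ excludes exactly the inputs on which Python's A raises
-- (IndexError on unbalanced '..'/short lines, UnboundLocalError on early 'dir' lines)
def Pre_pathifyDirect (lsts : List (List String)) : Prop :=
  BaseOK_pathifyDirect lsts ∧ DirOK_pathifyDirect lsts

instance (lsts : List (List String)) : Decidable (Pre_pathifyDirect lsts) := by
  unfold Pre_pathifyDirect BaseOK_pathifyDirect DirOK_pathifyDirect; infer_instance

def pvWitness_pathifyDirect : List (List String) :=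
  [["$","cd","/"],["$","ls"],["dir","a"],["123","b.txt"],["$","cd","a"],["$","cd",".."],["dir","z","q","w"]]

def Spec_pathifyDirect (lsts : List (List String)) (out : List (List String) × List String) : Prop := out = pathifyDirect_alt lsts
instance (lsts : List (List String)) (out : List (List String) × List String) : Decidable (Spec_pathifyDirect lsts out) := by unfold Spec_pathifyDirect; infer_instance

-- ===== CLAIM (what is proved, stated in full; the proofs are below) =====
def Claim_equal_pathifyDirect : Prop := ∀ (lsts : List (List String)), Dom_pathifyDirect lsts → Pre_pathifyDirect lsts → Spec_pathifyDirect lsts (pathifyDirect lsts)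

-- ===== LEMMAS AND PROOFS =====

-- B's stack as a function of A's path: the list of cumulative concatenations
def cumuls (p : List String) : List String :=
  p.foldl (fun acc x => acc ++ [(acc.getLast?.getD "") ++ x]) []

theorem cumuls_snoc (p : List String) (x : String) :
    cumuls (p ++ [x]) = cumuls p ++ [((cumuls p).getLast?.getD "") ++ x] := by
  simp [cumuls, List.foldl_append]

theorem concatLst_snoc (p : List String) (x : String) :
    concatLst (p ++ [x]) = concatLst p ++ x := by
  simp [concatLst, List.foldl_append]

theorem cumuls_getLast (p : List String) :
    (cumuls p).getLast?.getD "" = concatLst p := by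
  induction p using List.reverseRecOn with
  | nil => rfl
  | append_singleton p x ih =>
      rw [cumuls_snoc, concatLst_snoc, List.getLast?_concat]
      simp [ih]

theorem cumuls_dropLast (p : List String) :
    cumuls p.dropLast = (cumuls p).dropLast := by
  induction p using List.reverseRecOn with
  | nil => rfl
  | append_singleton p x ih =>
      rw [cumuls_snoc]
      simp

theorem loop_eq (lsts : List (List String)) :
    ∀ (path dirs : List String) (dp : Option String) (outL : List (List String)),
    dp.getD "" = concatLst path →
    (lsts.foldl stepB (cumuls path, dp.getD "", outL, dirs)) =
      (cumuls (lsts.foldl stepA (path, dirs, dp, outL)).1,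
       ((lsts.foldl stepA (path, dirs, dp, outL)).2.2.1).getD "",
       (lsts.foldl stepA (path, dirs, dp, outL)).2.2.2,
       (lsts.foldl stepA (path, dirs, dp, outL)).2.1) := by
  induction lsts with
  | nil => intro path dirs dp outL h; simp [h]
  | cons line rest ih =>
    intro path dirs dp outL h
    show (rest.foldl stepB (stepB (cumuls path, dp.getD "", outL, dirs) line)) = _
    rcases line with _ | ⟨a, _ | ⟨b, _ | ⟨c, _ | ⟨d, t⟩⟩⟩⟩
    · -- []
      simpa [stepA, stepB] using ih path dirs dp (outL ++ [[]]) h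
    · -- [a]
      by_cases hd : PySem.Str.strIsdigit a
      · have ha : a ≠ "dir" := by rintro rfl; revert hd; decide
        simpa [stepA, stepB, hd, ha] using ih path dirs dp (outL ++ [[a]]) h
      · by_cases ha : a = "dir"
        · simpa [stepA, stepB, hd, ha] using ih path dirs dp (outL ++ [[a]]) h
        · simpa [stepA, stepB, hd, ha] using ih path dirs dp (outL ++ [[a]]) h
    · -- [a, b]
      by_cases hd : PySem.Str.strIsdigit a
      · have ha : a ≠ "dir" := by rintro rfl; revert hd; decide
        simpa [stepA, stepB, hd, ha] using ih path dirs dp (outL ++ [[a, b]]) h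
      · by_cases ha : a = "dir"
        · simpa [stepA, stepB, hd, ha, h] using
            ih path dirs dp (outL ++ [[a, concatLst path ++ b]]) h
        · simpa [stepA, stepB, hd, ha] using ih path dirs dp (outL ++ [[a, b]]) h
    · -- [a, b, c]  (a 3-element cd line)
      by_cases hc : c = ".."
      · -- pop
        have hA : stepA (path, dirs, dp, outL) [a, b, c] =
            (path.dropLast, dirs, some (concatLst path.dropLast), outL ++ [[a, b, c]]) := by
          simp [stepA, PySem.List.pyGet?, PySem.List.pyIdx?, hc]
        have hB : stepB (cumuls path, dp.getD "", outL, dirs) [a, b, c] =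
            (cumuls path.dropLast, concatLst path.dropLast, outL ++ [[a, b, c]], dirs) := by
          simp only [stepB, PySem.List.pyGet?, PySem.List.pyIdx?, hc]
          rw [← cumuls_dropLast, cumuls_getLast]
          simp
        simp only [List.foldl_cons] at *
        rw [hA, hB]
        simpa using ih path.dropLast dirs (some (concatLst path.dropLast))
          (outL ++ [[a, b, c]]) (by simp)
      · -- push
        have hA : stepA (path, dirs, dp, outL) [a, b, c] =
            (path ++ [c], dirs ++ [concatLst (path ++ [c])], some (concatLst (path ++ [c])),
              outL ++ [[a, b, concatLst (path ++ [c])]]) := by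
          simp [stepA, PySem.List.pyGet?, PySem.List.pyIdx?, hc]
        have hB : stepB (cumuls path, dp.getD "", outL, dirs) [a, b, c] =
            (cumuls (path ++ [c]), concatLst (path ++ [c]),
              outL ++ [[a, b, concatLst (path ++ [c])]], dirs ++ [concatLst (path ++ [c])]) := by
          simp [stepB, PySem.List.pyGet?, PySem.List.pyIdx?, hc, cumuls_snoc,
            cumuls_getLast, concatLst_snoc]
        simp only [List.foldl_cons] at *
        rw [hA, hB]
        simpa using ih (path ++ [c]) (dirs ++ [concatLst (path ++ [c])])
          (some (concatLst (path ++ [c]))) (outL ++ [[a, b, concatLst (path ++ [c])]]) (by simp)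
    · -- a :: b :: c :: d :: t  (length ≥ 4)
      by_cases hd : PySem.Str.strIsdigit a
      · have ha : a ≠ "dir" := by rintro rfl; revert hd; decide
        simpa [stepA, stepB, hd, ha] using ih path dirs dp (outL ++ [a :: b :: c :: d :: t]) h
      · by_cases ha : a = "dir"
        · simpa [stepA, stepB, hd, ha, h] using
            ih path dirs dp (outL ++ [a :: (concatLst path ++ b) :: c :: d :: t]) h
        · simpa [stepA, stepB, hd, ha] using ih path dirs dp (outL ++ [a :: b :: c :: d :: t]) h

-- ===== VERDICT (by name: the statement is the Claim_ definition above) =====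
theorem pathifyDirect_spec : Claim_equal_pathifyDirect := by
  intro lsts _ _
  unfold Spec_pathifyDirect pathifyDirect pathifyDirect_alt
  have h := loop_eq lsts [] [] none [] (by rfl)
  simp only [show cumuls [] = [] from rfl, show (Option.getD (α := String) none "") = "" from rfl] at h
  rw [h]
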